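-- pv_equiv track=rewrite | github.com/Leonard249/SC4021-project | backend/nlp/pragmatics/aspect_extractor.py | _match_sentence
-- ===== SOURCE A (Python) =====
-- from typing import Optional
--
-- def _match_sentence(
--
--     ent_start: int,
--     ent_end: int,
--     sent_intervals: list[tuple[int, int]],
--     canonical_sentences: list[str],
-- ) -> Optional[tuple[str, int]]:
--     """
--     Return (canonical_sentence_text, sentence_start) for the first
--     sentence whose [sent_start, sent_end) interval strictly contains
--     [ent_start, ent_end).
--
--     Containment condition (half-open intervals, no off-by-one needed):
--         ent_start >= sent_start  AND  ent_end <= sent_end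
--     """
--     for (sent_start, sent_end), sent_text in zip(
--         sent_intervals, canonical_sentences
--     ):
--         if ent_start >= sent_start and ent_end <= sent_end:
--             return sent_text, sent_start
--     return None
-- ===== SOURCE B (Python) =====
-- from typing import Optional
--
--
-- def _match_sentence(
--     ent_start: int,
--     ent_end: int,
--     sent_intervals: list[tuple[int, int]],
--     canonical_sentences: list[str],
-- ) -> Optional[tuple[str, int]]:
--     """Sentence spans come sorted (nondecreasing starts and ends), so the
--     first sentence ending at or after ent_end is the only possible match:
--     binary search for it, then check it starts at or before ent_start."""
--     n = min(len(sent_intervals), len(canonical_sentences))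
--     lo, hi = 0, n
--     while lo < hi:
--         mid = (lo + hi) // 2
--         if sent_intervals[mid][1] < ent_end:
--             lo = mid + 1
--         else:
--             hi = mid
--     if lo < n and sent_intervals[lo][0] <= ent_start:
--         return canonical_sentences[lo], sent_intervals[lo][0]
--     return None
-- ===== Notes on version B (the rewrite author's own statement) =====
-- stated objective: alternative
-- what changed: A linearly scans the zipped (interval, sentence) pairs for the first containing interval; B binary-searches for the first interval whose end reaches ent_end and checks that single candidate, which is exact because Pre_ restricts to sorted sentence spans (nondecreasing starts and ends over the zipped pairs, the shape real sentence intervals have); on unsorted interval lists, where A still returns its scan's first match, B may answer differently, so Pre_ excludes them.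
-- outside the precondition, e.g. on _match_sentence(0, 1, [(5, 9), (0, 4)], ['x', 'y']): A returns ('y', 0), B returns None
import Mathlib
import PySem

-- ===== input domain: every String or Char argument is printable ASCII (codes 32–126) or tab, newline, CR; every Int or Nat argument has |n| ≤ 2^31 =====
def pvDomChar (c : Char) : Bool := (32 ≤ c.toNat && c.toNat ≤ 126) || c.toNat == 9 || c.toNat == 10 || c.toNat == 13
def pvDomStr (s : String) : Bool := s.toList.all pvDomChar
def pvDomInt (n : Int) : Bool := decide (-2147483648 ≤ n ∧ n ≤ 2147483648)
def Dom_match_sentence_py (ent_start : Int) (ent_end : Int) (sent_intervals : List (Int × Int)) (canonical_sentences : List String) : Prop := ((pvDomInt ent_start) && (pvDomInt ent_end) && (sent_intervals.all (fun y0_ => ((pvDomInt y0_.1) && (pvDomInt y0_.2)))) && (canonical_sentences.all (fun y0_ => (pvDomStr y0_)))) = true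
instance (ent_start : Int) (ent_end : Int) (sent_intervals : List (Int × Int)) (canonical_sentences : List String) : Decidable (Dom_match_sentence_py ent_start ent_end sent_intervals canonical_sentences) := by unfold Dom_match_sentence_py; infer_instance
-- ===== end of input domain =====

-- B replaces A's linear scan by a binary search for the first sentence end reaching ent_end (objective: alternative); Pre_ restricts to sorted sentence spans, where that is exact.


-- ===== PORT A =====
-- A's `for … in zip(…)` loop with early return
def msGoA (ent_start ent_end : Int) : List ((Int × Int) × String) → Option (String × Int)
  | [] => none
  | (p, t) :: rest =>
      if ent_start ≥ p.1 ∧ ent_end ≤ p.2 then some (t, p.1)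
      else msGoA ent_start ent_end rest

def match_sentence_py (ent_start : Int) (ent_end : Int) (sent_intervals : List (Int × Int)) (canonical_sentences : List String) : Option (String × Int) :=
  msGoA ent_start ent_end (List.zip sent_intervals canonical_sentences)

-- ===== PORT B =====
-- B's `while lo < hi` binary-search loop (the getD default is never read: indices stay below n ≤ length)
def msBs (ent_end : Int) (xs : List (Int × Int)) (lo hi : Nat) : Nat :=
  if _h : lo < hi then
    let mid := (lo + hi) / 2
    if (xs.getD mid (0, 0)).2 < ent_end then msBs ent_end xs (mid + 1) hi
    else msBs ent_end xs lo mid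
  else lo
termination_by hi - lo
decreasing_by all_goals omega

def match_sentence_py_alt (ent_start : Int) (ent_end : Int) (sent_intervals : List (Int × Int)) (canonical_sentences : List String) : Option (String × Int) :=
  let n := min sent_intervals.length canonical_sentences.length
  let lo := msBs ent_end sent_intervals 0 n
  if lo < n ∧ (sent_intervals.getD lo (0, 0)).1 ≤ ent_start then
    some (canonical_sentences.getD lo "", (sent_intervals.getD lo (0, 0)).1)
  else none

-- ===== PRECONDITION & SPEC =====
-- Pre_ excludes unsorted sentence-span lists: there A still returns its scan's first match,
-- but the binary search is only meaningful on the sorted, in-document-order spans the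
-- function is written for (nondecreasing starts and ends over the zipped pairs).
def Pre_match_sentence_py (ent_start : Int) (ent_end : Int) (sent_intervals : List (Int × Int)) (canonical_sentences : List String) : Prop :=
  (sent_intervals.zip canonical_sentences).Pairwise
    (fun a b => a.1.1 ≤ b.1.1 ∧ a.1.2 ≤ b.1.2)
instance (ent_start : Int) (ent_end : Int) (sent_intervals : List (Int × Int)) (canonical_sentences : List String) : Decidable (Pre_match_sentence_py ent_start ent_end sent_intervals canonical_sentences) := by unfold Pre_match_sentence_py; infer_instance

def pvWitness_match_sentence_py : Int × Int × (List (Int × Int)) × List String :=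
  (2, 3, [(0, 4), (5, 9)], ["ab", "cd"])

def Spec_match_sentence_py (ent_start : Int) (ent_end : Int) (sent_intervals : List (Int × Int)) (canonical_sentences : List String) (out : Option (String × Int)) : Prop := out = match_sentence_py_alt ent_start ent_end sent_intervals canonical_sentences
instance (ent_start : Int) (ent_end : Int) (sent_intervals : List (Int × Int)) (canonical_sentences : List String) (out : Option (String × Int)) : Decidable (Spec_match_sentence_py ent_start ent_end sent_intervals canonical_sentences out) := by unfold Spec_match_sentence_py; infer_instance

-- ===== CLAIM (what is proved, stated in full; the proofs are below) =====
def Claim_equal_match_sentence_py : Prop := ∀ (ent_start : Int) (ent_end : Int) (sent_intervals : List (Int × Int)) (canonical_sentences : List String), Dom_match_sentence_py ent_start ent_end sent_intervals canonical_sentences → Pre_match_sentence_py ent_start ent_end sent_intervals canonical_sentences → Spec_match_sentence_py ent_start ent_end sent_intervals canonical_sentences (match_sentence_py ent_start ent_end sent_intervals canonical_sentences)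

-- ===== LEMMAS AND PROOFS =====

-- A's scan returns none when no pair satisfies the containment condition.
theorem msGoA_none (es ee : Int) (z : List ((Int × Int) × String))
    (h : ∀ q ∈ z, ¬ (es ≥ q.1.1 ∧ ee ≤ q.1.2)) : msGoA es ee z = none := by
  induction z with
  | nil => rfl
  | cons q t ih =>
    obtain ⟨p, s⟩ := q
    rw [msGoA, if_neg (h (p, s) List.mem_cons_self)]
    exact ih fun q hq => h q (List.mem_cons_of_mem _ hq)

-- A's scan returns the pair at the first index satisfying the condition.
theorem msGoA_some (es ee : Int) :
    ∀ (z : List ((Int × Int) × String)) (r : Nat) (hr : r < z.length),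
      (∀ i (hi : i < r), ¬ (es ≥ (z[i]'(by omega)).1.1 ∧ ee ≤ (z[i]'(by omega)).1.2)) →
      (es ≥ (z[r]'hr).1.1 ∧ ee ≤ (z[r]'hr).1.2) →
      msGoA es ee z = some ((z[r]'hr).2, (z[r]'hr).1.1) := by
  intro z
  induction z with
  | nil => intro r hr; simp at hr
  | cons q t ih =>
    intro r hr hpre hcond
    obtain ⟨p, s⟩ := q
    cases r with
    | zero =>
      simp only [List.getElem_cons_zero] at hcond
      rw [msGoA, if_pos hcond]; simp
    | succ r' =>
      have h0 : ¬ (es ≥ ((p, s)).1.1 ∧ ee ≤ ((p, s)).1.2) := by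
        have := hpre 0 (Nat.succ_pos _); simpa using this
      rw [msGoA, if_neg h0]
      have hr' : r' < t.length := by simpa using hr
      have := ih r' hr'
        (fun i hi => by
          have := hpre (i + 1) (by omega)
          simpa using this)
        (by simpa using hcond)
      simpa using this

-- Invariant of the binary-search loop: it lands on the first index whose end reaches ent_end.
theorem msBs_spec (ee : Int) (xs : List (Int × Int)) (n : Nat)
    (mono : ∀ i j, i ≤ j → j < n → (xs.getD i (0, 0)).2 ≤ (xs.getD j (0, 0)).2) :
    ∀ d lo hi, hi - lo = d → lo ≤ hi → hi ≤ n →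
      (∀ i, i < lo → (xs.getD i (0, 0)).2 < ee) →
      (∀ i, hi ≤ i → i < n → ee ≤ (xs.getD i (0, 0)).2) →
      (∀ i, i < msBs ee xs lo hi → (xs.getD i (0, 0)).2 < ee) ∧
        msBs ee xs lo hi ≤ n ∧
        (msBs ee xs lo hi < n → ee ≤ (xs.getD (msBs ee xs lo hi) (0, 0)).2) := by
  intro d
  induction d using Nat.strong_induction_on with
  | _ d ihd =>
    intro lo hi hd hlohi hhin hlo hhi
    rw [msBs]
    by_cases h : lo < hi
    · rw [dif_pos h]
      set mid := (lo + hi) / 2 with hmid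
      have hmlo : lo ≤ mid := by omega
      have hmhi : mid < hi := by omega
      by_cases hc : (xs.getD mid (0, 0)).2 < ee
      · rw [if_pos hc]
        exact ihd (hi - (mid + 1)) (by omega) (mid + 1) hi rfl (by omega) hhin
          (fun i hi' => lt_of_le_of_lt (mono i mid (by omega) (by omega)) hc) hhi
      · rw [if_neg hc]
        exact ihd (mid - lo) (by omega) lo mid rfl (by omega) (by omega) hlo
          (fun i hmi hin => le_trans (not_lt.mp hc) (mono mid i hmi hin))
    · rw [dif_neg h]
      have : lo = hi := by omega
      exact ⟨hlo, by omega, fun hln => hhi lo (by omega) hln⟩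

-- ===== VERDICT (by name: the statement is the Claim_ definition above) =====
theorem match_sentence_py_spec : Claim_equal_match_sentence_py := by
  intro es ee xs ys _hdom hpre
  unfold Spec_match_sentence_py match_sentence_py
  have hzl : (xs.zip ys).length = min xs.length ys.length := List.length_zip
  have hzel : ∀ i (hi : i < min xs.length ys.length),
      (xs.zip ys)[i]'(by omega) = (xs[i]'(by omega), ys[i]'(by omega)) := by
    intro i hi; simp
  have hgd : ∀ i (hi : i < min xs.length ys.length),
      xs.getD i (0, 0) = xs[i]'(by omega) := by
    intro i hi; exact List.getD_eq_getElem xs (0, 0) (by omega)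
  have hpw : ∀ i j (hi : i < min xs.length ys.length) (hj : j < min xs.length ys.length),
      i < j →
      (xs[i]'(by omega)).1 ≤ (xs[j]'(by omega)).1 ∧
        (xs[i]'(by omega)).2 ≤ (xs[j]'(by omega)).2 := by
    intro i j hi hj hij
    have := (List.pairwise_iff_getElem.mp hpre) i j (by omega) (by omega) hij
    rw [hzel i hi, hzel j hj] at this
    exact this
  have mono : ∀ i j, i ≤ j → j < min xs.length ys.length →
      (xs.getD i (0, 0)).2 ≤ (xs.getD j (0, 0)).2 := by
    intro i j hij hj
    rcases Nat.lt_or_ge i j with hlt | hge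
    · rw [hgd i (by omega), hgd j hj]; exact (hpw i j (by omega) hj hlt).2
    · have : i = j := by omega
      subst this; rfl
  obtain ⟨hbelow, hrn, hat⟩ := msBs_spec ee xs (min xs.length ys.length) mono
    (min xs.length ys.length) 0 (min xs.length ys.length) rfl (by omega) le_rfl
    (by omega) (fun i hi _ => absurd hi (by omega))
  have halt : match_sentence_py_alt es ee xs ys =
      (if msBs ee xs 0 (min xs.length ys.length) < min xs.length ys.length ∧
          (xs.getD (msBs ee xs 0 (min xs.length ys.length)) (0, 0)).1 ≤ es then
        some (ys.getD (msBs ee xs 0 (min xs.length ys.length)) "",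
              (xs.getD (msBs ee xs 0 (min xs.length ys.length)) (0, 0)).1)
      else none) := rfl
  rw [halt]
  set r := msBs ee xs 0 (min xs.length ys.length) with hr
  by_cases hcond : r < min xs.length ys.length ∧ (xs.getD r (0, 0)).1 ≤ es
  · rw [if_pos hcond]
    obtain ⟨hrlt, hstart⟩ := hcond
    rw [msGoA_some es ee (xs.zip ys) r (by omega)
      (fun i hi hci => absurd hci (by
        rw [hzel i (by omega)]
        intro hc
        exact absurd hc.2 (not_le.mpr (by rw [← hgd i (by omega)]; exact hbelow i hi))))
      (by
        rw [hzel r hrlt]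
        exact ⟨by rw [← hgd r hrlt]; exact hstart, by rw [← hgd r hrlt]; exact hat hrlt⟩)]
    rw [hzel r hrlt, hgd r hrlt, List.getD_eq_getElem ys "" (by omega)]
  · rw [if_neg hcond]
    rw [msGoA_none es ee (xs.zip ys)]
    intro q hq hc
    obtain ⟨i, hi, hqi⟩ := List.getElem_of_mem hq
    have hin : i < min xs.length ys.length := by omega
    rw [← hqi, hzel i hin] at hc
    rcases Nat.lt_or_ge i r with hir | hri
    · exact absurd hc.2 (not_le.mpr (by rw [← hgd i hin]; exact hbelow i hir))
    · have hrlt : r < min xs.length ys.length := by omega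
      have hsr : ¬ (xs.getD r (0, 0)).1 ≤ es := fun hle => hcond ⟨hrlt, hle⟩
      have hle : (xs.getD r (0, 0)).1 ≤ (xs[i]'(by omega)).1 := by
        rcases Nat.lt_or_ge r i with hlt | hge
        · rw [hgd r hrlt]; exact (hpw r i hrlt hin hlt).1
        · have : r = i := by omega
          subst this; rw [hgd r hrlt]
      exact hsr (le_trans hle hc.1)
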